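-- pv_equiv track=rewrite | github.com/salesforce/pomgen | src/common/code.py | _has_only_space_in_front
-- ===== SOURCE A (Python) =====
-- def _has_only_space_in_front(text, start_index):
--     if start_index < 0 or start_index >= len(text):
--         raise IndexError("start_index is out of bounds")
--     current_index = start_index
--     while current_index > 0:
--         current_index -= 1
--         char = text[current_index]
--         if char == '\n':
--             return True
--         if not char.isspace():
--             return False
--     return True
-- ===== SOURCE B (Python) =====
-- def _has_only_space_in_front(text, start_index):
--     if start_index < 0 or start_index >= len(text):
--         raise IndexError("start_index is out of bounds")
--     line_start = text.rfind('\n', 0, start_index) + 1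
--     segment = text[line_start:start_index]
--     return segment == '' or segment.isspace()
-- ===== Notes on version B (the rewrite author's own statement) =====
-- stated objective: simpler
-- what changed: Replaces the backward char-by-char while-loop with a library rfind to locate the start of the line, then a slice and a single whitespace test on the segment (with the empty-segment guard, since ''.isspace() is False).
import Mathlib
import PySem

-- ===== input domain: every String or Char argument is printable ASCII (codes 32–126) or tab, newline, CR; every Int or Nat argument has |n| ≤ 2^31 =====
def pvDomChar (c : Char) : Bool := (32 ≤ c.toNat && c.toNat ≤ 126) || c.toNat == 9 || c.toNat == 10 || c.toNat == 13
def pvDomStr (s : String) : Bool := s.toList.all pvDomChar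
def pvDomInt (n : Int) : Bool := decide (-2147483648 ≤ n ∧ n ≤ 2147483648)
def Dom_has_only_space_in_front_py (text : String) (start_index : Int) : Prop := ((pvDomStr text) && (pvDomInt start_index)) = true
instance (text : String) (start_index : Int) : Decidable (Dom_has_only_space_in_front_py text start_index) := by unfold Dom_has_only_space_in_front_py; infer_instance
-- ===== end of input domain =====

-- B replaces A's backward char-by-char while-loop with rfind('\n') + a slice + one whitespace test (simpler decomposition, same cost).

-- ===== PORT A =====
-- A's backward while-loop: current_index counts down from start_index
def hosif_loop (cs : List Char) : Nat → Bool
  | 0 => true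
  | k + 1 =>
    let char := PySem.List.pyGetD cs (k : Int) ' '
    if char = '\n' then true
    else if ¬ PySem.Chars.isspace char then false
    else hosif_loop cs k

def has_only_space_in_front_py (text : String) (start_index : Int) : Bool :=
  if start_index < 0 ∨ PySem.Str.len text ≤ start_index then
    false  -- Python raises IndexError here; excluded by Pre_
  else hosif_loop text.toList start_index.toNat

-- ===== PORT B =====
def has_only_space_in_front_py_alt (text : String) (start_index : Int) : Bool :=
  if start_index < 0 ∨ PySem.Str.len text ≤ start_index then
    false  -- Python raises IndexError here; excluded by Pre_
  else
    let lineStart := PySem.Str.rfindFrom text "\n" 0 (some start_index) + 1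
    let segment := PySem.Str.slice text (some lineStart) (some start_index)
    (segment == "") || PySem.Str.strIsspace segment

-- ===== PRECONDITION & SPEC =====
-- Pre_ excludes exactly the out-of-bounds indices, on which both Pythons raise IndexError.
def Pre_has_only_space_in_front_py (text : String) (start_index : Int) : Prop :=
  0 ≤ start_index ∧ start_index < PySem.Str.len text
instance (text : String) (start_index : Int) : Decidable (Pre_has_only_space_in_front_py text start_index) := by unfold Pre_has_only_space_in_front_py; infer_instance

def pvWitness_has_only_space_in_front_py : String × Int := (" x", 1)

def Spec_has_only_space_in_front_py (text : String) (start_index : Int) (out : Bool) : Prop := out = has_only_space_in_front_py_alt text start_index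
instance (text : String) (start_index : Int) (out : Bool) : Decidable (Spec_has_only_space_in_front_py text start_index out) := by unfold Spec_has_only_space_in_front_py; infer_instance

-- ===== CLAIM (what is proved, stated in full; the proofs are below) =====
def Claim_equal_has_only_space_in_front_py : Prop := ∀ (text : String) (start_index : Int), Dom_has_only_space_in_front_py text start_index → Pre_has_only_space_in_front_py text start_index → Spec_has_only_space_in_front_py text start_index (has_only_space_in_front_py text start_index)

-- ===== LEMMAS AND PROOFS =====

-- equation lemmas for the recursor of PySem.Chars.rfind.go
theorem hosif_go_zero (s sub : List Char) :
    PySem.Chars.rfind.go s sub 0 = if sub.isPrefixOf s then 0 else -1 := rfl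

theorem hosif_go_succ (s sub : List Char) (j : Nat) :
    PySem.Chars.rfind.go s sub (j + 1) =
      if sub.isPrefixOf (s.drop (j + 1)) then ((j : Int) + 1) else PySem.Chars.rfind.go s sub j := rfl

theorem hosif_go_le (t sub : List Char) (m : Nat) : PySem.Chars.rfind.go t sub m ≤ (m : Int) := by
  induction m with
  | zero => rw [hosif_go_zero]; split <;> omega
  | succ j ih => rw [hosif_go_succ]; split <;> [push_cast; skip] <;> omega

theorem hosif_go_ge (t sub : List Char) (m : Nat) : -1 ≤ PySem.Chars.rfind.go t sub m := by
  induction m with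
  | zero => rw [hosif_go_zero]; split <;> omega
  | succ j ih => rw [hosif_go_succ]; split <;> omega

theorem hosif_rfind_ge (t : List Char) : -1 ≤ PySem.Chars.rfind t ['\n'] :=
  hosif_go_ge t ['\n'] t.length

theorem hosif_rfind_lt (t : List Char) : PySem.Chars.rfind t ['\n'] < (t.length : Int) := by
  cases t with
  | nil => decide
  | cons a s =>
    show PySem.Chars.rfind.go (a :: s) ['\n'] (s.length + 1) < _
    rw [hosif_go_succ]
    have hd : (a :: s).drop (s.length + 1) = [] := by simp
    rw [hd]
    rw [show (['\n'].isPrefixOf ([] : List Char)) = false from rfl]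
    have := hosif_go_le (a :: s) ['\n'] s.length
    simp only [List.length_cons, Bool.false_eq_true, if_false]
    omega

-- go ignores a trailing appended char when its index stays inside t
theorem hosif_go_append (t : List Char) (c : Char) (m : Nat) (hm : m < t.length) :
    PySem.Chars.rfind.go (t ++ [c]) ['\n'] m = PySem.Chars.rfind.go t ['\n'] m := by
  induction m with
  | zero =>
    rw [hosif_go_zero, hosif_go_zero]
    cases t with
    | nil => simp at hm
    | cons a s => simp [List.isPrefixOf]
  | succ j ih =>
    rw [hosif_go_succ, hosif_go_succ]
    have hd : (t ++ [c]).drop (j + 1) = t.drop (j + 1) ++ [c] :=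
      List.drop_append_of_le_length (by omega)
    rw [hd]
    have hne : t.drop (j + 1) ≠ [] := by
      intro h
      have := List.drop_eq_nil_iff.mp h
      omega
    obtain ⟨a, u, hs⟩ := List.exists_cons_of_ne_nil hne
    rw [hs]
    simp only [List.cons_append, List.isPrefixOf, Bool.and_true]
    split
    · rfl
    · exact ih (by omega)

theorem hosif_rfind_append (t : List Char) (c : Char) :
    PySem.Chars.rfind (t ++ [c]) ['\n'] =
      if c = '\n' then (t.length : Int) else PySem.Chars.rfind t ['\n'] := by
  unfold PySem.Chars.rfind
  rw [show (t ++ [c]).length = t.length + 1 by simp, hosif_go_succ]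
  rw [show (t ++ [c]).drop (t.length + 1) = [] from List.drop_eq_nil_of_le (by simp)]
  rw [show (['\n'].isPrefixOf ([] : List Char)) = false from rfl]
  simp only [Bool.false_eq_true, if_false]
  cases t with
  | nil =>
    simp only [List.length_nil, List.nil_append]
    rw [hosif_go_zero, hosif_go_zero]
    by_cases hc : c = '\n'
    · subst hc; simp [List.isPrefixOf]
    · have h4 : (['\n'].isPrefixOf [c]) = false := by simp [List.isPrefixOf, Ne.symm hc]
      have h5 : (['\n'].isPrefixOf ([] : List Char)) = false := rfl
      simp [h4, h5, hc]
  | cons a s =>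
    simp only [List.length_cons, List.cons_append]
    rw [hosif_go_succ, hosif_go_succ]
    have h2 : (a :: (s ++ [c])).drop (s.length + 1) = [c] := by
      rw [show (a :: (s ++ [c])) = (a :: s) ++ [c] from rfl,
        List.drop_append_of_le_length (by simp), List.drop_eq_nil_of_le (by simp)]
      simp
    have h3 : (a :: s).drop (s.length + 1) = [] := List.drop_eq_nil_of_le (by simp)
    rw [h2, h3, show (['\n'].isPrefixOf ([] : List Char)) = false from rfl]
    by_cases hc : c = '\n'
    · subst hc; simp [List.isPrefixOf]
    · have h4 : (['\n'].isPrefixOf [c]) = false := by simp [List.isPrefixOf, Ne.symm hc]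
      rw [h4]
      simp only [Bool.false_eq_true, if_false, hc]
      exact hosif_go_append (a :: s) c s.length (by simp)

-- A's loop computes "every char after the last newline before index n is whitespace"
theorem hosif_loop_eq (cs : List Char) (n : Nat) (hn : n ≤ cs.length) :
    hosif_loop cs n =
      ((cs.take n).drop (PySem.Chars.rfind (cs.take n) ['\n'] + 1).toNat).all PySem.Chars.isspace := by
  induction n with
  | zero => simp [hosif_loop]
  | succ k ih =>
    have hk : k < cs.length := by omega
    have htake : cs.take (k + 1) = cs.take k ++ [cs[k]] := by
      rw [List.take_add_one]; simp [List.getElem?_eq_getElem hk]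
    rw [htake, hosif_rfind_append]
    have hlen : (cs.take k).length = k := List.length_take_of_le (by omega)
    simp only [hosif_loop]
    have hget : PySem.List.pyGetD cs (k : Int) ' ' = cs[k] := by
      rw [PySem.List.pyGetD_natCast, List.getD_eq_getElem cs ' ' hk]
    rw [hget]
    by_cases hc : cs[k] = '\n'
    · have hnil : (cs.take k ++ ['\n']).drop (k + 1) = [] :=
        List.drop_eq_nil_of_le (by simp [hlen])
      simp [hc, hlen, hnil]
    · have hlt := hosif_rfind_lt (cs.take k)
      have hge := hosif_rfind_ge (cs.take k)
      set r := PySem.Chars.rfind (cs.take k) ['\n'] with hr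
      rw [hlen] at hlt
      have hdrop : (cs.take k ++ [cs[k]]).drop (r + 1).toNat
          = (cs.take k).drop (r + 1).toNat ++ [cs[k]] :=
        List.drop_append_of_le_length (by omega)
      rw [if_neg hc, if_neg hc, hdrop, List.all_append]
      by_cases hs : PySem.Chars.isspace cs[k]
      · rw [if_neg (by simp [hs]), ih (by omega)]
        simp [hs]
      · rw [if_pos (by simp [hs])]
        simp [hs]

-- rfindFrom with bounds 0..i (0 ≤ i ≤ len) is rfind on the prefix before i
theorem hosif_rfindFrom_eq (cs : List Char) (i : Int) (h0 : 0 ≤ i) (hl : i ≤ (cs.length : Int)) :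
    PySem.Chars.rfindFrom cs ['\n'] 0 (some i) = PySem.Chars.rfind (cs.take i.toNat) ['\n'] := by
  unfold PySem.Chars.rfindFrom
  have h1 : ¬ ((cs.length : Int) < i) := by omega
  have h2 : ¬ (i < 0) := by omega
  simp only [h1, h2, if_false]
  split <;> rename_i hlt
  · omega
  · simp only [Int.toNat_zero, List.drop_zero]
    split <;> rename_i hr
    · rw [hr]
    · omega

-- the Boolean tail of B: empty-or-isspace over a string is 'all isspace' over its chars
theorem hosif_str_bool (s : String) :
    ((s == "") || PySem.Str.strIsspace s) = s.toList.all PySem.Chars.isspace := by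
  rw [PySem.Str.strIsspace]
  unfold PySem.Chars.strIsspace
  by_cases h : s.toList = []
  · have hs : s = "" := String.toList_eq_nil_iff.mp h
    simp [hs]
  · have h1 : (s == "") = false := by
      simpa using fun he => h (by simp [he])
    have h2 : s.toList.isEmpty = false := by simpa [List.isEmpty_iff] using h
    simp [h1, h2]

-- ===== VERDICT (by name: the statement is the Claim_ definition above) =====
theorem has_only_space_in_front_py_spec : Claim_equal_has_only_space_in_front_py := by
  intro text start_index _ hpre
  obtain ⟨h0, hl⟩ := hpre
  unfold Spec_has_only_space_in_front_py
  unfold has_only_space_in_front_py has_only_space_in_front_py_alt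
  have hb : ¬ (start_index < 0 ∨ PySem.Str.len text ≤ start_index) := by
    rintro (h | h) <;> [omega; exact absurd hl (by omega)]
  rw [if_neg hb, if_neg hb]
  have hlen : start_index < (text.toList.length : Int) := by
    simpa [PySem.Str.len, PySem.Chars.len] using hl
  have hnl : start_index.toNat ≤ text.toList.length := by omega
  have hrf : PySem.Str.rfindFrom text "\n" 0 (some start_index)
      = PySem.Chars.rfind (text.toList.take start_index.toNat) ['\n'] := by
    rw [PySem.Str.rfindFrom_eq]
    exact hosif_rfindFrom_eq text.toList start_index h0 (by omega)
  rw [hrf, hosif_str_bool]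
  have hge := hosif_rfind_ge (text.toList.take start_index.toNat)
  have hlt : PySem.Chars.rfind (text.toList.take start_index.toNat) ['\n']
      < (start_index.toNat : Int) := by
    have := hosif_rfind_lt (text.toList.take start_index.toNat)
    rwa [List.length_take_of_le hnl] at this
  have hbridge : (PySem.Str.slice text
        (some (PySem.Chars.rfind (text.toList.take start_index.toNat) ['\n'] + 1))
        (some start_index)).toList
      = PySem.List.slice text.toList
        (some (PySem.Chars.rfind (text.toList.take start_index.toNat) ['\n'] + 1))
        (some start_index) := by simp
  rw [hbridge, PySem.List.slice_toNat text.toList (by omega) h0,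
    hosif_loop_eq text.toList start_index.toNat hnl, List.drop_take]
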